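-- pv_equiv track=rewrite | github.com/laelbarlow/amoebae | amoebaelib/search_scaffolds.py | reduce_left_ranges
-- ===== SOURCE A (Python) =====
-- def reduce_left_ranges(sorted_left_ranges, top_hsp_range, max_gap):
--     # Reduce the list of left ranges to only those that meet the criteria.
--     reduced_left_ranges = []
--     last_range = top_hsp_range
--     for r in sorted_left_ranges:
--         # Only include range if it ends before last range starts and
--         # within max_gap.
--         if (last_range[0] - max_gap - 2) < r[1] < last_range[0]:
--             reduced_left_ranges.append(r)
--             last_range = r
--         else:
--             break
--
--     return reduced_left_ranges
-- ===== SOURCE B (Python) =====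
-- def reduce_left_ranges(sorted_left_ranges, top_hsp_range, max_gap):
--     # Staged computation instead of a stateful early-exit loop:
--     # 1) evaluate the gap predicate for EVERY range against its predecessor,
--     # 2) locate the first failure, 3) slice the prefix before it.
--     lst = list(sorted_left_ranges)
--     ok = [(p[0] - max_gap - 2) < c[1] < p[0]
--           for p, c in zip([top_hsp_range] + lst, lst)]
--     cut = ok.index(False) if False in ok else len(lst)
--     return lst[:cut]
-- ===== Notes on version B (the rewrite author's own statement) =====
-- stated objective: alternative
-- what changed: Replaced the stateful early-exit accumulator loop by three stages: a full pass computing a boolean list of predecessor-gap checks, an index search for the first failure, and a prefix slice; no early termination and no accumulated state.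
import Mathlib
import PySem

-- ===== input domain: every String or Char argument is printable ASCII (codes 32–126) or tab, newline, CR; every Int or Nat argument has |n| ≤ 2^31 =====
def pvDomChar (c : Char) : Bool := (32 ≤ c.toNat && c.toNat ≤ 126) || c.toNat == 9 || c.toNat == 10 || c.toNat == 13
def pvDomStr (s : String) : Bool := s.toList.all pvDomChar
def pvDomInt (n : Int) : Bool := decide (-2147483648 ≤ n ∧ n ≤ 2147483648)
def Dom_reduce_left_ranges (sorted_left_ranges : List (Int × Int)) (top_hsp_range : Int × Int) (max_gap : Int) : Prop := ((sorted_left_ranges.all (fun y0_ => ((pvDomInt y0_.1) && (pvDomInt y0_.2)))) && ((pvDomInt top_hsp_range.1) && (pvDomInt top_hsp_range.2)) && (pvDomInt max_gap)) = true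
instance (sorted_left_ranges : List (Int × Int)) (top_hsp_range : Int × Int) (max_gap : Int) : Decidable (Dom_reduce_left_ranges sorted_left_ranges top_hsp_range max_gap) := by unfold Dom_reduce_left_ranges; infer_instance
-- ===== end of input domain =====

-- B replaces A's stateful early-exit loop by staged passes (full boolean-check list, first-failure index, prefix slice); return values proved equal.


-- ===== PORT A =====
-- loop of A: accumulates while the condition holds, breaks otherwise; last_range is the state
def reduce_left_ranges_loop (rs : List (Int × Int)) (last_range : Int × Int) (max_gap : Int) : List (Int × Int) :=
  match rs with
  | [] => []
  | r :: rest =>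
    if (last_range.1 - max_gap - 2) < r.2 ∧ r.2 < last_range.1 then
      r :: reduce_left_ranges_loop rest r max_gap
    else []

def reduce_left_ranges (sorted_left_ranges : List (Int × Int)) (top_hsp_range : Int × Int) (max_gap : Int) : List (Int × Int) :=
  reduce_left_ranges_loop sorted_left_ranges top_hsp_range max_gap

-- ===== PORT B =====
-- B: stage 1 — boolean list of the gap check for every (predecessor, current) pair;
--    stage 2 — index of the first False (length if none); stage 3 — prefix slice.
def reduce_left_ranges_alt (sorted_left_ranges : List (Int × Int)) (top_hsp_range : Int × Int) (max_gap : Int) : List (Int × Int) :=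
  let ok := ((top_hsp_range :: sorted_left_ranges).zip sorted_left_ranges).map
    (fun pc => decide ((pc.1.1 - max_gap - 2) < pc.2.2 ∧ pc.2.2 < pc.1.1))
  let cut := if false ∈ ok then ok.idxOf false else sorted_left_ranges.length
  sorted_left_ranges.take cut

-- ===== PRECONDITION & SPEC =====
def Spec_reduce_left_ranges (sorted_left_ranges : List (Int × Int)) (top_hsp_range : Int × Int) (max_gap : Int) (out : List (Int × Int)) : Prop := out = reduce_left_ranges_alt sorted_left_ranges top_hsp_range max_gap
instance (sorted_left_ranges : List (Int × Int)) (top_hsp_range : Int × Int) (max_gap : Int) (out : List (Int × Int)) : Decidable (Spec_reduce_left_ranges sorted_left_ranges top_hsp_range max_gap out) := by unfold Spec_reduce_left_ranges; infer_instance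

-- ===== CLAIM =====
def Claim_equal_reduce_left_ranges : Prop := ∀ (sorted_left_ranges : List (Int × Int)) (top_hsp_range : Int × Int) (max_gap : Int), Dom_reduce_left_ranges sorted_left_ranges top_hsp_range max_gap → Spec_reduce_left_ranges sorted_left_ranges top_hsp_range max_gap (reduce_left_ranges sorted_left_ranges top_hsp_range max_gap)

-- ===== LEMMAS AND PROOFS =====
-- A's loop from state `last` equals B's staged computation with `last` prepended
theorem loop_eq_staged (l : List (Int × Int)) (last : Int × Int) (max_gap : Int) :
    reduce_left_ranges_loop l last max_gap =
      (let ok := ((last :: l).zip l).map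
          (fun pc => decide ((pc.1.1 - max_gap - 2) < pc.2.2 ∧ pc.2.2 < pc.1.1))
       let cut := if false ∈ ok then ok.idxOf false else l.length
       l.take cut) := by
  induction l generalizing last with
  | nil => simp [reduce_left_ranges_loop]
  | cons r rest ih =>
    simp only [reduce_left_ranges_loop, List.zip_cons_cons, List.map_cons]
    by_cases h : (last.1 - max_gap - 2) < r.2 ∧ r.2 < last.1
    · rw [if_pos h, decide_eq_true h, ih r]
      set ok' := ((r :: rest).zip rest).map
        (fun pc => decide ((pc.1.1 - max_gap - 2) < pc.2.2 ∧ pc.2.2 < pc.1.1)) with hok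
      have hmem : (false ∈ true :: ok') ↔ (false ∈ ok') := by simp
      have hidx : List.idxOf false (true :: ok') = List.idxOf false ok' + 1 := by
        simp
      by_cases hm : false ∈ ok'
      · simp only [hmem, hidx, if_pos hm, List.take_succ_cons]
      · simp only [hmem, if_neg hm, List.length_cons, List.take_succ_cons]
    · rw [if_neg h, decide_eq_false h]
      simp

-- ===== VERDICT =====
theorem reduce_left_ranges_spec : Claim_equal_reduce_left_ranges := by
  intro l top mg _
  unfold Spec_reduce_left_ranges reduce_left_ranges reduce_left_ranges_alt
  exact loop_eq_staged l top mg
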